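-- pv_equiv track=rewrite | github.com/chang2eee/Coding-Test | 프로그래머스/unrated/181829. 이차원 배열 대각선 순회하기/이차원 배열 대각선 순회하기.py | solution
-- ===== SOURCE A (Python) =====
-- def solution(board, k):
--     answer = 0
--     rows, cols = len(board), len(board[0])
--
--     for i in range(rows):
--         for j in range(cols):
--             if i + j <= k:
--                 answer += board[i][j]
--
--     return answer
-- ===== SOURCE B (Python) =====
-- def solution(board, k):
--     cols = len(board[0])
--     total = 0
--     for i, row in enumerate(board):
--         cutoff = min(cols, k - i + 1)
--         if cutoff > 0:
--             total += sum(row[:cutoff])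
--     return total
-- ===== Notes on version B (the rewrite author's own statement) =====
-- stated objective: faster
-- what changed: Replaces the nested loop with a per-cell 'i + j <= k' test by a single pass over rows that computes one arithmetic cutoff min(cols, k-i+1) per row and sums the slice row[:cutoff]; the inner Python-level scan and per-cell comparison disappear.
import Mathlib
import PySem

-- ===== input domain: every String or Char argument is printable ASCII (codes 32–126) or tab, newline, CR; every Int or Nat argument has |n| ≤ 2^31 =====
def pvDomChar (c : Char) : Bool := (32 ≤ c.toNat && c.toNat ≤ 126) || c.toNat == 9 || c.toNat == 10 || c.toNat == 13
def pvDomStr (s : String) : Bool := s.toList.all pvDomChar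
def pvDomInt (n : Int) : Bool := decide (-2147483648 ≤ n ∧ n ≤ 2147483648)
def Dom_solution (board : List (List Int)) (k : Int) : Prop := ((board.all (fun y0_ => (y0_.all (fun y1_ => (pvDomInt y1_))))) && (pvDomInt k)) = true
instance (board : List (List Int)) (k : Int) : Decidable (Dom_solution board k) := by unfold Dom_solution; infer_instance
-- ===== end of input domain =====

-- B replaces the per-cell 'i + j <= k' test with one arithmetic cutoff per row and a slice sum (a timing run measured B faster).

-- ===== PORT A =====
def solution (board : List (List Int)) (k : Int) : Int :=
  let rows : Int := board.length
  let cols : Int := (PySem.List.pyGetD board 0 []).length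
  (PySem.List.pyRange 0 rows 1).foldl (fun answer i =>
    (PySem.List.pyRange 0 cols 1).foldl (fun answer j =>
      if i + j ≤ k then answer + PySem.List.pyGetD (PySem.List.pyGetD board i []) j 0 else answer)
      answer) 0

-- ===== PORT B =====
def solution_alt (board : List (List Int)) (k : Int) : Int :=
  let cols : Int := (PySem.List.pyGetD board 0 []).length
  (PySem.List.enumerate board 0).foldl (fun total p =>
    let cutoff := min cols (k - p.1 + 1)
    if 0 < cutoff then total + (PySem.List.slice p.2 none (some cutoff)).sum else total) 0

-- ===== PRECONDITION & SPEC =====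
-- Pre_ excludes exactly the inputs where A raises: the empty board (IndexError on board[0]) and
-- ragged boards on which some visited cell board[i][j] (j < cols, i + j ≤ k) is past row i's end.
def Pre_solution (board : List (List Int)) (k : Int) : Prop :=
  board ≠ [] ∧ ∀ p ∈ PySem.List.enumerate board 0,
    min (((PySem.List.pyGetD board 0 []).length : Int)) (k - p.1 + 1) ≤ (p.2.length : Int)
instance (board : List (List Int)) (k : Int) : Decidable (Pre_solution board k) := by
  unfold Pre_solution; infer_instance
def pvWitness_solution : List (List Int) × Int := ([[1, 2], [3, 4]], 1)

def Spec_solution (board : List (List Int)) (k : Int) (out : Int) : Prop := out = solution_alt board k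
instance (board : List (List Int)) (k : Int) (out : Int) : Decidable (Spec_solution board k out) := by
  unfold Spec_solution; infer_instance

-- ===== CLAIM (what is proved, stated in full; the proofs are below) =====
def Claim_equal_solution : Prop := ∀ (board : List (List Int)) (k : Int), Dom_solution board k → Pre_solution board k → Spec_solution board k (solution board k)

-- ===== LEMMAS AND PROOFS =====

-- sum of one more taken element (general List fact specialised to Int rows)
lemma take_succ_sum : ∀ (row : List Int) (m : Nat),
    (row.take (m + 1)).sum = (row.take m).sum + row.getD m 0 := by
  intro row
  induction row with
  | nil => intro m; simp
  | cons x xs ih =>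
      intro m
      cases m with
      | zero => simp
      | succ m => simp [List.take_succ_cons, ih m, add_assoc]

-- A's inner loop over Nat indices equals a prefix sum of the row
lemma foldl_range_if (row : List Int) (lim : Int) : ∀ (n : Nat) (a : Int),
    (List.range n).foldl (fun a (j : Nat) => if (j : Int) ≤ lim then a + row.getD j 0 else a) a
      = a + (row.take (min n (lim + 1).toNat)).sum := by
  intro n
  induction n with
  | zero => intro a; simp
  | succ n ih =>
      intro a
      rw [List.range_succ, List.foldl_append, ih]
      simp only [List.foldl_cons, List.foldl_nil]
      by_cases h : (n : Int) ≤ lim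
      · have h1 : min (n + 1) (lim + 1).toNat = min n (lim + 1).toNat + 1 := by omega
        have h2 : min n (lim + 1).toNat = n := by omega
        rw [if_pos h, h1, h2, take_succ_sum]
        ring
      · have h1 : min (n + 1) (lim + 1).toNat = min n (lim + 1).toNat := by omega
        rw [if_neg h, h1]

-- B's per-row contribution is the same prefix sum
lemma cutoff_slice_eq (row : List Int) (cols : Nat) (lim : Int) :
    (if 0 < min (cols : Int) (lim + 1)
      then (PySem.List.slice row none (some (min (cols : Int) (lim + 1)))).sum else 0)
      = (row.take (min cols (lim + 1).toNat)).sum := by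
  by_cases h : 0 < min (cols : Int) (lim + 1)
  · rw [if_pos h, PySem.List.slice_to row (le_of_lt h)]
    have he : (min (cols : Int) (lim + 1)).toNat = min cols (lim + 1).toNat := by omega
    rw [he]
  · rw [if_neg h]
    have : min cols (lim + 1).toNat = 0 := by omega
    rw [this]
    simp

-- the two ports agree everywhere (the ports are total; Pre_ only delimits where A's Python returns)
lemma ports_agree (board : List (List Int)) (k : Int) :
    solution board k = solution_alt board k := by
  simp only [solution, solution_alt]
  rw [PySem.List.enumerate_eq_map_pyRange board ([] : List Int), List.foldl_map]
  simp only [PySem.List.len_eq]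
  rw [PySem.List.pyRange_one 0 (board.length : Int)]
  simp only [sub_zero, Int.toNat_natCast, zero_add, List.foldl_map,
    PySem.List.pyGetD_natCast]
  congr 1
  funext a i
  rw [PySem.List.pyRange_one 0 ((PySem.List.pyGetD board 0 []).length : Int)]
  simp only [sub_zero, Int.toNat_natCast, zero_add, List.foldl_map,
    PySem.List.pyGetD_natCast]
  have hcond : ∀ (b : Int) (j : Nat),
      (if (i : Int) + (j : Int) ≤ k then b + (board.getD i []).getD j 0 else b)
        = (if (j : Int) ≤ k - (i : Int) then b + (board.getD i []).getD j 0 else b) := by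
    intro b j
    by_cases hc : (i : Int) + (j : Int) ≤ k
    · rw [if_pos hc, if_pos (by omega)]
    · rw [if_neg hc, if_neg (by omega)]
  simp only [hcond]
  rw [foldl_range_if (board.getD i []) (k - (i : Int)) _ a,
    ← cutoff_slice_eq (board.getD i []) ((PySem.List.pyGetD board 0 []).length) (k - (i : Int))]
  split_ifs <;> ring

-- ===== VERDICT (by name: the statement is the Claim_ definition above) =====
theorem solution_spec : Claim_equal_solution := by
  intro board k _ _
  unfold Spec_solution
  exact ports_agree board k
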